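-- pv_equiv track=rewrite | github.com/sumitksahu1406/dsa-patterns | sliding_windows/02_first_negative_in_window.py | first_negative_in_window
-- ===== SOURCE A (Python) =====
-- def first_negative_in_window(arr, k):
--     n = len(arr)
--     result = []
--
--     # Loop over all possible windows
--     for i in range(n - k + 1):
--         found = False
--
--         # Scan the window of size k
--         for j in range(i, i + k):
--             if arr[j] < 0:
--                 result.append(arr[j])  # first negative
--                 found = True
--                 break
--
--         # If no negative found in this window
--         if not found:
--             result.append(0)
--
--     return result
-- ===== SOURCE B (Python) =====
-- def first_negative_in_window(arr, k):
--     n = len(arr)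
--     # nxt[i] = index of the first negative element at position >= i (n if none),
--     # built back-to-front in one pass; each window's answer is then a lookup.
--     nxt = [n]
--     for i in range(n - 1, -1, -1):
--         nxt.append(i if arr[i] < 0 else nxt[-1])
--     nxt.reverse()
--     return [arr[nxt[i]] if nxt[i] < i + k else 0 for i in range(n - k + 1)]
-- ===== Notes on version B (the rewrite author's own statement) =====
-- stated objective: faster
-- what changed: Replaces the per-window rescan with a back-to-front precomputed next-negative-index array, so each window's answer is a single lookup.
-- outside the precondition, e.g. on first_negative_in_window([1], -1): A returns [0, 0, 0], B raises IndexError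
import Mathlib
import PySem

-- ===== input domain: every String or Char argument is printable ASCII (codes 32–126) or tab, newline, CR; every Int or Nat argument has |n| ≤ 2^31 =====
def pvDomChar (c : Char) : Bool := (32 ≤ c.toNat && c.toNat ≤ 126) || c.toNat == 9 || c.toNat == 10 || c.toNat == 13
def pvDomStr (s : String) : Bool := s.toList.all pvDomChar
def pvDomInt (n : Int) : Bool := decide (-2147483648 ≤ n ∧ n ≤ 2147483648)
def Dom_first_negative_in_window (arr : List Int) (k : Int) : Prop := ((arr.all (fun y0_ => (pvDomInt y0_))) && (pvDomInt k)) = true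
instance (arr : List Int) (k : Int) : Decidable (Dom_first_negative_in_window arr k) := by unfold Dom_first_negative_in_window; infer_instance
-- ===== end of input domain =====

-- B replaces A's per-window O(k) rescan with a precomputed next-negative-index
-- array built back-to-front, answering each window with one lookup (O(n) total).


-- ===== PORT A =====
-- inner window scan with break: first arr[j] < 0 among the indices js (all in range)
def aScan (arr : List Int) : List Int → Option Int
  | [] => none
  | j :: rest =>
    if PySem.List.pyGetD arr j 0 < 0 then some (PySem.List.pyGetD arr j 0)
    else aScan arr rest

def first_negative_in_window (arr : List Int) (k : Int) : List Int :=
  let n : Int := arr.length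
  (PySem.List.pyRange 0 (n - k + 1) 1).foldl
    (fun result i =>
      match aScan arr (PySem.List.pyRange i (i + k) 1) with
      | some v => result ++ [v]
      | none => result ++ [0]) []

-- ===== PORT B =====
def first_negative_in_window_alt (arr : List Int) (k : Int) : List Int :=
  let n : Int := arr.length
  let nxt := ((PySem.List.pyRange (n - 1) (-1) (-1)).foldl
    (fun nxt i =>
      nxt ++ [if PySem.List.pyGetD arr i 0 < 0 then i else PySem.List.pyGetD nxt (-1) 0])
    [n]).reverse
  (PySem.List.pyRange 0 (n - k + 1) 1).map
    (fun i =>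
      if PySem.List.pyGetD nxt i 0 < i + k then PySem.List.pyGetD arr (PySem.List.pyGetD nxt i 0) 0
      else 0)

-- ===== PRECONDITION & SPEC =====
-- Pre_ restricts to the natural domain k ≥ 0 (a window size): for negative k, A
-- happens to return n-k+1 zeros while B's lookup raises IndexError.
def Pre_first_negative_in_window (_arr : List Int) (k : Int) : Prop := 0 ≤ k
instance (arr : List Int) (k : Int) : Decidable (Pre_first_negative_in_window arr k) := by unfold Pre_first_negative_in_window; infer_instance
def pvWitness_first_negative_in_window : List Int × Int := ([-1, 2, 3], 2)

def Spec_first_negative_in_window (arr : List Int) (k : Int) (out : List Int) : Prop := out = first_negative_in_window_alt arr k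
instance (arr : List Int) (k : Int) (out : List Int) : Decidable (Spec_first_negative_in_window arr k out) := by unfold Spec_first_negative_in_window; infer_instance

-- ===== CLAIM (what is proved, stated in full; the proofs are below) =====
def Claim_equal_first_negative_in_window : Prop := ∀ (arr : List Int) (k : Int), Dom_first_negative_in_window arr k → Pre_first_negative_in_window arr k → Spec_first_negative_in_window arr k (first_negative_in_window arr k)

-- ===== LEMMAS AND PROOFS =====

-- reference function: index of the first negative element at position ≥ i (length if none)
def fNxt (arr : List Int) (i : Nat) : Int :=
  if h : i < arr.length then
    (if arr[i] < 0 then (i : Int) else fNxt arr (i + 1))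
  else (arr.length : Int)
termination_by arr.length - i

theorem fNxt_ge (arr : List Int) (i : Nat) (hi : i ≤ arr.length) : (i : Int) ≤ fNxt arr i := by
  unfold fNxt
  split
  · split
    · exact le_refl _
    · have := fNxt_ge arr (i + 1) (by omega); push_cast at this ⊢; omega
  · omega
termination_by arr.length - i

theorem fNxt_le (arr : List Int) (i : Nat) : fNxt arr i ≤ (arr.length : Int) := by
  unfold fNxt
  split
  · split
    · omega
    · exact fNxt_le arr (i + 1)
  · exact le_refl _
termination_by arr.length - i

-- B1: the back-to-front fold builds exactly the reversed table of fNxt values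
theorem bfold_eq (arr : List Int) :
    ∀ (i : Nat) (acc : List Int), i ≤ arr.length → acc.getLast? = some (fNxt arr i) →
    (PySem.List.pyRange ((i : Int) - 1) (-1) (-1)).foldl
      (fun nxt j =>
        nxt ++ [if PySem.List.pyGetD arr j 0 < 0 then j else PySem.List.pyGetD nxt (-1) 0])
      acc
    = acc ++ ((List.range i).reverse.map (fun j => fNxt arr j)) := by
  intro i
  induction i with
  | zero =>
    intro acc _ _
    rw [PySem.List.pyRange_neg_one_eq_nil (by omega)]
    simp
  | succ m ih =>
    intro acc hle hlast
    have hm : ((m + 1 : Nat) : Int) - 1 = (m : Int) := by push_cast; ring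
    rw [hm, PySem.List.pyRange_neg_one_cons (by omega), List.foldl_cons]
    have hne : acc ≠ [] := by intro h; simp [h] at hlast
    have hgetD : PySem.List.pyGetD acc (-1) 0 = fNxt arr (m + 1) := by
      rw [PySem.List.pyGetD_neg_one acc 0 hne, List.getLast_eq_iff_getLast?_eq_some hne]
      exact hlast
    have hmlt : m < arr.length := by omega
    have hstep :
        (acc ++ [if PySem.List.pyGetD arr (m : Int) 0 < 0 then (m : Int)
                 else PySem.List.pyGetD acc (-1) 0])
        = acc ++ [fNxt arr m] := by
      have hv : PySem.List.pyGetD arr (m : Int) 0 = arr[m] := by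
        rw [PySem.List.pyGetD_natCast]
        exact List.getD_eq_getElem arr 0 hmlt
      rw [hgetD, hv]
      conv_rhs => rw [fNxt]
      simp [hmlt]
    rw [hstep, ih (acc ++ [fNxt arr m]) (by omega) (by simp)]
    simp [List.range_succ]

-- A1: the window scan finds fNxt's element iff it lies inside the window
theorem aScan_eq (arr : List Int) :
    ∀ (w i : Nat), i + w ≤ arr.length →
    aScan arr (PySem.List.pyRange (i : Int) ((i : Int) + (w : Int)) 1)
      = if fNxt arr i < (i : Int) + (w : Int)
        then some (PySem.List.pyGetD arr (fNxt arr i) 0) else none := by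
  intro w
  induction w with
  | zero =>
    intro i hle
    rw [PySem.List.pyRange_one_eq_nil (by omega)]
    have := fNxt_ge arr i (by omega)
    simp only [aScan]
    rw [if_neg (by push_cast; omega)]
  | succ m ih =>
    intro i hle
    have hmlt : i < arr.length := by omega
    have hv : PySem.List.pyGetD arr (i : Int) 0 = arr[i] := by
      rw [PySem.List.pyGetD_natCast]
      exact List.getD_eq_getElem arr 0 hmlt
    rw [PySem.List.pyRange_one_cons (by push_cast; omega)]
    simp only [aScan, hv]
    by_cases hneg : arr[i] < 0
    · rw [if_pos hneg]
      conv_rhs => rw [fNxt]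
      simp only [hmlt, dif_pos, if_pos hneg]
      rw [if_pos (by push_cast; omega), hv]
    · rw [if_neg hneg]
      have hcast : (i : Int) + 1 = ((i + 1 : Nat) : Int) := by push_cast; ring
      have hcast2 : (i : Int) + ((m + 1 : Nat) : Int) = ((i + 1 : Nat) : Int) + (m : Int) := by
        push_cast; ring
      rw [hcast, hcast2, ih (i + 1) (by omega)]
      conv_rhs => rw [fNxt]
      simp only [hmlt, dif_pos, if_neg hneg]

-- ===== VERDICT (by name: the statement is the Claim_ definition above) =====
theorem fNxt_length (arr : List Int) : fNxt arr arr.length = (arr.length : Int) := by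
  rw [fNxt]; simp

theorem nxt_table (arr : List Int) :
    (((PySem.List.pyRange ((arr.length : Int) - 1) (-1) (-1)).foldl
      (fun nxt i =>
        nxt ++ [if PySem.List.pyGetD arr i 0 < 0 then i else PySem.List.pyGetD nxt (-1) 0])
      [(arr.length : Int)]).reverse)
    = (List.range arr.length).map (fun j => fNxt arr j) ++ [(arr.length : Int)] := by
  rw [bfold_eq arr arr.length [(arr.length : Int)] (le_refl _) (by simp [fNxt_length])]
  simp

theorem first_negative_in_window_spec : Claim_equal_first_negative_in_window := by
  unfold Claim_equal_first_negative_in_window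
  intro arr k _ hk
  unfold Spec_first_negative_in_window
  unfold first_negative_in_window first_negative_in_window_alt
  simp only []
  rw [nxt_table arr]
  have hkk : 0 ≤ k := hk
  -- A's foldl-with-match is an append-singleton foldl
  have hstep :
      (fun (result : List Int) (i : Int) =>
        match aScan arr (PySem.List.pyRange i (i + k) 1) with
        | some v => result ++ [v]
        | none => result ++ [0])
      = (fun (result : List Int) (i : Int) =>
          result ++ [match aScan arr (PySem.List.pyRange i (i + k) 1) with
                     | some v => v
                     | none => 0]) := by
    funext r i
    cases aScan arr (PySem.List.pyRange i (i + k) 1) <;> rfl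
  rw [hstep, PySem.List.foldl_append_singleton_eq_map]
  simp only [List.nil_append]
  apply List.map_congr_left
  intro i hi
  rw [PySem.List.mem_pyRange_one] at hi
  obtain ⟨hi0, hi1⟩ := hi
  set j := i.toNat with hj
  have hij : (j : Int) = i := Int.toNat_of_nonneg hi0
  set w := k.toNat with hw
  have hwk : (w : Int) = k := Int.toNat_of_nonneg hkk
  have hjw : j + w ≤ arr.length := by omega
  have htab : PySem.List.pyGetD
      ((List.range arr.length).map (fun j => fNxt arr j) ++ [(arr.length : Int)]) i 0
      = fNxt arr j := by
    have hlen : ((List.range arr.length).map (fun j => fNxt arr j) ++ [(arr.length : Int)]).length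
        = arr.length + 1 := by simp
    rw [PySem.List.pyGetD_eq_getElem _ 0 hi0 (by rw [hlen]; push_cast; omega)]
    rcases Nat.lt_or_ge j arr.length with hlt | hge
    · rw [List.getElem_append_left (by simpa using hlt)]
      simp [← hj]
    · have hjeq : j = arr.length := by omega
      have : ((List.range arr.length).map (fun j => fNxt arr j)).length = arr.length := by simp
      rw [List.getElem_append_right (by omega)]
      simp [hjeq, this, fNxt_length]
  have hscan := aScan_eq arr w j hjw
  rw [hij, hwk] at hscan
  rw [hscan, htab]
  by_cases hc : fNxt arr j < i + k
  · rw [if_pos hc, if_pos hc]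
  · rw [if_neg hc, if_neg hc]
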